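-- pv_equiv track=rewrite | github.com/jo25425/nefertiti-likes-pokemons | BybloCmp/inputchecking.py | isValidReuse
-- ===== SOURCE A (Python) =====
-- def isValidReuse(string, required=None):
-- 	test = string.split(',')
-- 	reuseList = ["baseThesaurus", "bybloOutput", "histograms"]
-- 	for item in test:
-- 		if item in reuseList:
-- 			reuseList.remove(item)
-- 		else: return False
-- 	return True
-- ===== SOURCE B (Python) =====
-- def isValidReuse(string, required=None):
--     items = string.split(',')
--     allowed = {"baseThesaurus", "bybloOutput", "histograms"}
--     return len(items) == len(set(items)) and set(items) <= allowed
-- ===== Notes on version B (the rewrite author's own statement) =====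
-- stated objective: simpler
-- what changed: Replaces the per-item loop that mutates (removes from) the allowed list with two set comparisons: uniqueness via len(items)==len(set(items)) and membership via a subset test against a fixed set.
import Mathlib
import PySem

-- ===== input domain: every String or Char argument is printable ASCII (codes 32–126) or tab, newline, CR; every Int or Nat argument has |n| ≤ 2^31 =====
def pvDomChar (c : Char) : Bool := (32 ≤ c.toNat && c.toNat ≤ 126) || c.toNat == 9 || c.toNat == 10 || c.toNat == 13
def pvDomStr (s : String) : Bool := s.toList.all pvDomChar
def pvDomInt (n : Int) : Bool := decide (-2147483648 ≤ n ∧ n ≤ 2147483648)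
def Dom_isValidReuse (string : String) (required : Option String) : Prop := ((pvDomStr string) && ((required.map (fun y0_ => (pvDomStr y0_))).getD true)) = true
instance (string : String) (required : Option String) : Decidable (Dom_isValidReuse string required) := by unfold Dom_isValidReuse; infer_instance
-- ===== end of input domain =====

-- B replaces A's loop that mutates (removes from) the allowed list with two set
-- comparisons (uniqueness via length-of-set, membership via subset); simpler, same cost class.


-- ===== PORT A =====
-- the 'for item in test' loop: state = the mutable reuseList; 'reuseList.remove(item)'
-- under the membership guard is List.erase (PySem.List.remove?_eq_some_erase)
def pvLoopA (test : List String) (reuseList : List String) : Bool :=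
  match test with
  | [] => true
  | item :: rest =>
      if reuseList.contains item then pvLoopA rest (reuseList.erase item)
      else false

def isValidReuse (string : String) (required : Option String) : Bool :=
  -- s.split(',') with the literal non-empty separator: split? is always `some` here
  let test := (PySem.Str.split? string ",").getD []
  let reuseList := ["baseThesaurus", "bybloOutput", "histograms"]
  pvLoopA test reuseList

-- ===== PORT B =====
def isValidReuse_alt (string : String) (required : Option String) : Bool :=
  let items := (PySem.Str.split? string ",").getD []
  let allowed : PySem.Set String := PySem.Set.ofList ["baseThesaurus", "bybloOutput", "histograms"]
  decide ((PySem.List.len items) = (PySem.Set.len (PySem.Set.ofList items)))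
    && PySem.Set.issubset (PySem.Set.ofList items) allowed

-- ===== PRECONDITION & SPEC =====
def Spec_isValidReuse (string : String) (required : Option String) (out : Bool) : Prop := out = isValidReuse_alt string required
instance (string : String) (required : Option String) (out : Bool) : Decidable (Spec_isValidReuse string required out) := by unfold Spec_isValidReuse; infer_instance

-- ===== CLAIM (what is proved, stated in full; the proofs are below) =====
def Claim_equal_isValidReuse : Prop := ∀ (string : String) (required : Option String), Dom_isValidReuse string required → Spec_isValidReuse string required (isValidReuse string required)

-- ===== LEMMAS AND PROOFS =====

-- A's loop succeeds iff the items are pairwise distinct and all lie in the (duplicate-free) list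
lemma pvLoopA_char (test : List String) (rl : List String) (h : rl.Nodup) :
    pvLoopA test rl = (decide test.Nodup && test.all (fun x => rl.contains x)) := by
  induction test generalizing rl with
  | nil => simp [pvLoopA]
  | cons item rest ih =>
      by_cases hmem : item ∈ rl
      · have herase : (rl.erase item).Nodup := h.erase item
        simp only [pvLoopA, List.contains_eq_mem, hmem, decide_true, if_true, ih _ herase]
        by_cases hn : rest.Nodup
        · by_cases hi : item ∈ rest
          · -- duplicate: RHS nodup fails; LHS: item ∉ rl.erase item since rl nodup
            have hnotin : item ∉ rl.erase item := by
              simp [h.mem_erase_iff]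
            simp only [List.nodup_cons, hi]
            simp
            exact fun _ => ⟨item, hi, hnotin⟩
          · simp only [List.nodup_cons, hi, not_false_iff, true_and, hn, decide_true,
              Bool.true_and, List.all_cons, List.contains_eq_mem, hmem, Bool.true_and]
            rw [Bool.eq_iff_iff]
            simp only [List.all_eq_true, decide_eq_true_eq]
            constructor
            · intro hall x hx
              exact List.mem_of_mem_erase (hall x hx)
            · intro hall x hx
              rw [h.mem_erase_iff]
              exact ⟨fun he => hi (he ▸ hx), hall x hx⟩
        · simp [hn, List.nodup_cons]
      · simp [pvLoopA, hmem]

-- len(set(xs)) = len(xs) iff xs has no duplicates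
lemma len_ofList_eq_iff (xs : List String) :
    ((PySem.Set.ofList xs).length = xs.length) ↔ xs.Nodup := by
  constructor
  · intro hlen
    by_contra hnd
    have hlt : (PySem.Set.ofList xs).length < xs.length := by
      clear hlen
      induction xs with
      | nil => simp at hnd
      | cons x rest ih =>
          rw [PySem.Set.ofList_cons]
          by_cases hr : rest.Nodup
          · have hx : x ∈ rest := by
              by_contra hx; exact hnd (List.nodup_cons.2 ⟨hx, hr⟩)
            have : (PySem.Set.discard (PySem.Set.ofList rest) x).length < (PySem.Set.ofList rest).length := by
              apply List.length_filter_lt_length_iff_exists.2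
              refine ⟨x, ?_, ?_⟩
              · exact (PySem.Set.mem_ofList _ _).2 hx
              · simp
            calc (x :: PySem.Set.discard (PySem.Set.ofList rest) x).length
                = (PySem.Set.discard (PySem.Set.ofList rest) x).length + 1 := by simp
              _ ≤ (PySem.Set.ofList rest).length := this
              _ ≤ rest.length := PySem.Set.length_ofList_le rest
              _ < (x :: rest).length := by simp
          · have := ih hr
            have hd : (PySem.Set.discard (PySem.Set.ofList rest) x).length ≤ (PySem.Set.ofList rest).length :=
              List.length_filter_le _ _
            simp only [List.length_cons]
            omega
    omega
  · intro h
    rw [PySem.Set.ofList_eq_self_of_nodup _ h]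

theorem isValidReuse_spec_aux (string : String) (required : Option String) :
    isValidReuse string required = isValidReuse_alt string required := by
  unfold isValidReuse isValidReuse_alt
  set test := (PySem.Str.split? string ",").getD []
  have hnodup : (["baseThesaurus", "bybloOutput", "histograms"] : List String).Nodup := by decide
  rw [pvLoopA_char test _ hnodup]
  have hallowed : PySem.Set.ofList (["baseThesaurus", "bybloOutput", "histograms"] : List String)
      = ["baseThesaurus", "bybloOutput", "histograms"] := PySem.Set.ofList_eq_self_of_nodup _ hnodup
  rw [hallowed]
  congr 1
  · -- nodup ↔ length equality
    simp only [PySem.List.len_eq, PySem.Set.len, decide_eq_decide]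
    rw [← len_ofList_eq_iff]
    constructor <;> intro h <;> exact_mod_cast h.symm
  · -- all-membership ↔ subset
    rcases Bool.eq_false_or_eq_true (PySem.Set.issubset (PySem.Set.ofList test) ["baseThesaurus", "bybloOutput", "histograms"]) with hb | hb
    · rw [hb, List.all_eq_true]
      rw [PySem.Set.issubset_iff] at hb
      intro x hx
      have : x ∈ PySem.Set.ofList test := by simpa [PySem.Set.mem_ofList] using hx
      simpa using hb x this
    · rw [hb, List.all_eq_false]
      rw [Bool.eq_false_iff, Ne, PySem.Set.issubset_iff] at hb
      push_neg at hb
      rcases hb with ⟨x, hx, hnx⟩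
      refine ⟨x, ?_, by simpa using hnx⟩
      simpa [PySem.Set.mem_ofList] using hx

-- ===== VERDICT (by name: the statement is the Claim_ definition above) =====
theorem isValidReuse_spec : Claim_equal_isValidReuse := by
  intro string required _
  exact isValidReuse_spec_aux string required
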